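-- pv_equiv track=rewrite | github.com/yoavital98/AriExpress | ariExpressDjango/mainApp/views.py | get_number_at_end
-- ===== SOURCE A (Python) =====
-- def get_number_at_end(string):
--     number = ""
--     for char in string[::-1]:
--         if char.isdigit():
--             number = char + number
--         else:
--             break
--     return int(number)
-- ===== SOURCE B (Python) =====
-- def get_number_at_end(string):
--     start = 0
--     for i, c in enumerate(string):
--         if not c.isdigit():
--             start = i + 1
--     return int(string[start:])
-- ===== Notes on version B (the rewrite author's own statement) =====
-- stated objective: alternative
-- what changed: Replaces the reversed scan with early break and backward character-by-character string accumulation by a single forward pass over enumerate(string) that tracks the index just past the last non-digit, then converts the trailing slice with one int() call.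
import Mathlib
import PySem

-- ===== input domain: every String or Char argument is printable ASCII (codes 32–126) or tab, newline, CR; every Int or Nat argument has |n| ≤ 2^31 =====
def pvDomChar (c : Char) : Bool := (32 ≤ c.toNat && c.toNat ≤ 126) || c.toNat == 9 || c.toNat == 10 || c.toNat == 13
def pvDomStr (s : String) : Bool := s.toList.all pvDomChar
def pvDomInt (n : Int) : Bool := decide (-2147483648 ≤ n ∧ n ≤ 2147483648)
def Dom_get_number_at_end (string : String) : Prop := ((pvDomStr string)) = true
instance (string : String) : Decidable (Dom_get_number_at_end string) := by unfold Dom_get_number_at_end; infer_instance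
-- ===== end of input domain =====

-- B replaces A's reversed scan-and-break with backward accumulation by one forward pass
-- tracking the index past the last non-digit, then a single int() of the trailing slice (alternative decomposition, same cost).

-- ===== PORT A =====
-- the reversed loop with break: accumulate `number` by prepending each digit, stop at the first non-digit
def pvLoopA : List Char → List Char → List Char
  | [], num => num
  | c :: rest, num => if PySem.Chars.isdigit c then pvLoopA rest (c :: num) else num

def get_number_at_end (string : String) : Int :=
  (PySem.Int.ofChars? (pvLoopA string.toList.reverse [])).getD 0

-- ===== PORT B =====
-- forward pass: start = index just past the last non-digit, computed over enumerate(string)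
def get_number_at_end_alt (string : String) : Int :=
  let cs := string.toList
  let start := (PySem.List.enumerate cs).foldl
    (fun st p => if PySem.Chars.isdigit p.2 then st else p.1 + 1) 0
  (PySem.Int.ofChars? (PySem.List.slice cs (some start) none)).getD 0

-- ===== PRECONDITION & SPEC =====
-- Pre_ excludes exactly the strings with no trailing digit (empty string or last char not a digit),
-- on which Python's int("") raises ValueError in both A and B.
def Pre_get_number_at_end (string : String) : Prop :=
  (string.toList.getLast?.map PySem.Chars.isdigit).getD false = true
instance (string : String) : Decidable (Pre_get_number_at_end string) := by
  unfold Pre_get_number_at_end; infer_instance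

def pvWitness_get_number_at_end : String := "a17"

def Spec_get_number_at_end (string : String) (out : Int) : Prop := out = get_number_at_end_alt string
instance (string : String) (out : Int) : Decidable (Spec_get_number_at_end string out) := by unfold Spec_get_number_at_end; infer_instance

-- ===== CLAIM (what is proved, stated in full; the proofs are below) =====
def Claim_equal_get_number_at_end : Prop := ∀ (string : String), Dom_get_number_at_end string → Pre_get_number_at_end string → Spec_get_number_at_end string (get_number_at_end string)

-- ===== LEMMAS AND PROOFS =====

theorem pvLoopA_eq_takeWhile (r num : List Char) :
    pvLoopA r num = (r.takeWhile PySem.Chars.isdigit).reverse ++ num := by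
  induction r generalizing num with
  | nil => simp [pvLoopA]
  | cons c rest ih =>
    by_cases h : PySem.Chars.isdigit c
    · simp [pvLoopA, h, List.takeWhile_cons, ih]
    · simp [pvLoopA, h, List.takeWhile_cons]

theorem pvEnumerate_append_singleton (l : List Char) (c : Char) (s : Int) :
    PySem.List.enumerate (l ++ [c]) s
      = PySem.List.enumerate l s ++ [(s + l.length, c)] := by
  induction l generalizing s with
  | nil => simp [PySem.List.enumerate_cons, PySem.List.enumerate_nil]
  | cons x xs ih =>
    simp only [List.cons_append, PySem.List.enumerate_cons, ih, List.append_assoc]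
    norm_num
    ring_nf

def pvStart (cs : List Char) : Int :=
  (PySem.List.enumerate cs).foldl
    (fun st p => if PySem.Chars.isdigit p.2 then st else p.1 + 1) 0

theorem pvStart_append (l : List Char) (c : Char) :
    pvStart (l ++ [c])
      = if PySem.Chars.isdigit c then pvStart l else (l.length : Int) + 1 := by
  unfold pvStart
  rw [pvEnumerate_append_singleton, List.foldl_append]
  simp

theorem pvStart_bounds (cs : List Char) : 0 ≤ pvStart cs ∧ pvStart cs ≤ cs.length := by
  induction cs using List.reverseRecOn with
  | nil => simp [pvStart, PySem.List.enumerate_nil]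
  | append_singleton l c ih =>
    rw [pvStart_append]
    split <;> simp <;> omega

theorem pvDrop_start (cs : List Char) :
    cs.drop (pvStart cs).toNat = (cs.reverse.takeWhile PySem.Chars.isdigit).reverse := by
  induction cs using List.reverseRecOn with
  | nil => simp
  | append_singleton l c ih =>
    rw [pvStart_append]
    by_cases h : PySem.Chars.isdigit c
    · have hb := pvStart_bounds l
      rw [if_pos h, List.drop_append_of_le_length (by omega)]
      simp [List.takeWhile_cons, h, ih]
    · rw [if_neg h]
      have : ((l.length : Int) + 1).toNat = l.length + 1 := by omega
      simp [this, h]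

theorem get_number_at_end_eq (string : String) :
    get_number_at_end string = get_number_at_end_alt string := by
  unfold get_number_at_end get_number_at_end_alt
  show _ = (PySem.Int.ofChars? (PySem.List.slice string.toList (some (pvStart string.toList)) none)).getD 0
  rw [pvLoopA_eq_takeWhile,
    PySem.List.slice_from string.toList (pvStart_bounds string.toList).1, pvDrop_start]
  simp

-- ===== VERDICT (by name: the statement is the Claim_ definition above) =====
theorem get_number_at_end_spec : Claim_equal_get_number_at_end := by
  intro s _ _
  unfold Spec_get_number_at_end
  exact get_number_at_end_eq s
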